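-- pv_equiv track=rewrite | github.com/cnulatienpo/spanish | tools/export_bundles.py | group_by_level
-- ===== SOURCE A (Python) =====
-- from typing import Dict, Iterable, List
--
-- ORDERED_KEYS = [
--     "word",
--     "pos",
--     "gender",
--     "english",
--     "origin",
--     "story",
--     "example",
--     "level",
-- ]
--
-- def clean_entry(entry: dict) -> dict:
--     cleaned = {}
--     for key in ORDERED_KEYS:
--         if key in entry:
--             cleaned[key] = entry[key]
--     extra_keys = [
--         key
--         for key in entry
--         if key not in cleaned and not key.startswith("_")
--     ]
--     for key in sorted(extra_keys):
--         cleaned[key] = entry[key]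
--     return cleaned
--
-- def group_by_level(entries: Iterable[dict]) -> Dict[str, List[dict]]:
--     grouped: Dict[str, List[dict]] = {}
--     for entry in entries:
--         level = entry.get("level")
--         if not level:
--             continue
--         grouped.setdefault(level, []).append(clean_entry(entry))
--     for level_entries in grouped.values():
--         level_entries.sort(key=lambda item: item.get("word", "").casefold())
--     return grouped
-- ===== SOURCE B (Python) =====
-- from typing import Dict, Iterable, List
--
-- ORDERED_KEYS = [
--     "word",
--     "pos",
--     "gender",
--     "english",
--     "origin",
--     "story",
--     "example",
--     "level",
-- ]
--
-- def _clean(entry: dict) -> dict: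
--     front = [k for k in ORDERED_KEYS if k in entry]
--     extras = sorted(
--         k for k in entry if k not in ORDERED_KEYS and not k.startswith("_")
--     )
--     return {k: entry[k] for k in front + extras}
--
-- def group_by_level(entries: Iterable[dict]) -> Dict[str, List[dict]]:
--     order: List[str] = []
--     flat = []
--     for entry in entries:
--         level = entry.get("level", "")
--         if not level:
--             continue
--         if level not in order:
--             order.append(level)
--         flat.append((level, _clean(entry)))
--     flat.sort(key=lambda p: p[1].get("word", "").casefold())
--     grouped: Dict[str, List[dict]] = {lvl: [] for lvl in order}
--     for lvl, cleaned in flat: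
--         grouped[lvl].append(cleaned)
--     return grouped
-- ===== Notes on version B (the rewrite author's own statement) =====
-- stated objective: alternative
-- what changed: Instead of bucketing first and sorting every bucket separately, B cleans entries into one flat list in a single pass (recording level first-appearance order), stably sorts that flat list once by the casefolded word, and then buckets the sorted list into the pre-seeded groups; _clean builds the key list up front and uses one dict comprehension instead of two insert loops.
import Mathlib
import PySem

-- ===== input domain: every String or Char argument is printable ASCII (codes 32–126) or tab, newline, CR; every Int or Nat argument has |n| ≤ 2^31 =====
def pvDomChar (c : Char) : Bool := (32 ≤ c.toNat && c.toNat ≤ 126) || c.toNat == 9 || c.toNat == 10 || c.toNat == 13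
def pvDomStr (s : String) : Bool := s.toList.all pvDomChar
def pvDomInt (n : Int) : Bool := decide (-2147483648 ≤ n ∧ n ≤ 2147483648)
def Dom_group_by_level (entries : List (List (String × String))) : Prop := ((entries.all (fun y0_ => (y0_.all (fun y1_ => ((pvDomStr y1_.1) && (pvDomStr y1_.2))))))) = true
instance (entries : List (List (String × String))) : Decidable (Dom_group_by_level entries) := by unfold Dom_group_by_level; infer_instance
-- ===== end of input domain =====

-- B regroups by one stable flat sort instead of per-bucket sorts; return-value equivalence only (A sorts its buckets in place).

-- ===== PORT A =====
def ORDERED_KEYS : List String :=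
  ["word", "pos", "gender", "english", "origin", "story", "example", "level"]

-- sort key lambda `item.get("word", "").casefold()` shared by both sources; .casefold() = .lower() on the ASCII Dom
-- String comparison is ported as code-point (List Char) comparison, which is Python's string order
def pvWordKey (item : List (String × String)) : List Char :=
  PySem.Chars.lower (((PySem.Dict.mk item).getD "word" "").toList)

def clean_entry (entry : PySem.Dict String String) : PySem.Dict String String :=
  -- for key in ORDERED_KEYS: if key in entry: cleaned[key] = entry[key]   (entry[key] with the key present = getD)
  let cleaned := ORDERED_KEYS.foldl
    (fun c k => if entry.contains k then c.insert k (entry.getD k "") else c) PySem.Dict.empty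
  let extra_keys := entry.keys.filter
    (fun k => !(cleaned.contains k) && !(PySem.Str.startswith k "_"))
  (PySem.List.sorted extra_keys (fun k => k.toList) false).foldl
    (fun c k => c.insert k (entry.getD k "")) cleaned

def group_by_level (entries : List (List (String × String))) : List (String × List (List (String × String))) :=
  let grouped : PySem.Dict String (List (List (String × String))) :=
    entries.foldl (fun g e =>
      let d := PySem.Dict.ofList e
      match d.get? "level" with            -- level = entry.get("level")
      | none => g                           -- if not level: continue
      | some level =>
        if level = "" then g
        else g.modify level [] (fun xs => xs ++ [(clean_entry d).items]))  -- setdefault(...).append(clean_entry(entry))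
      PySem.Dict.empty
  grouped.items.map (fun p => (p.1, PySem.List.sorted p.2 pvWordKey false))  -- level_entries.sort(key=...)

-- ===== PORT B =====
def clean_alt (entry : PySem.Dict String String) : List (String × String) :=
  let front := ORDERED_KEYS.filter (fun k => entry.contains k)
  let extras := PySem.List.sorted
    (entry.keys.filter (fun k => !(ORDERED_KEYS.contains k) && !(PySem.Str.startswith k "_")))
    (fun k => k.toList) false
  -- {k: entry[k] for k in front + extras}: the keys are distinct, so the dict's items are exactly this list
  (front ++ extras).map (fun k => (k, entry.getD k ""))

def group_by_level_alt (entries : List (List (String × String))) : List (String × List (List (String × String))) :=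
  let s := entries.foldl (fun (s : List String × List (String × List (String × String))) e =>
      let d := PySem.Dict.ofList e
      let level := d.getD "level" ""       -- entry.get("level", "")
      if level = "" then s
      else (PySem.Set.add s.1 level,        -- if level not in order: order.append(level)
            s.2 ++ [(level, clean_alt d)])) -- flat.append((level, _clean(entry)))
    ([], [])
  let sortedFlat := PySem.List.sorted s.2 (fun p => pvWordKey p.2) false  -- flat.sort(key=...)
  let seeded : PySem.Dict String (List (List (String × String))) :=
    s.1.foldl (fun g lvl => g.insert lvl []) PySem.Dict.empty             -- {lvl: [] for lvl in order}
  (sortedFlat.foldl (fun g p => g.modify p.1 [] (fun xs => xs ++ [p.2])) seeded).items  -- grouped[lvl].append(cleaned) (key always present)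

-- ===== PRECONDITION & SPEC =====
def Spec_group_by_level (entries : List (List (String × String))) (out : List (String × List (List (String × String)))) : Prop := out = group_by_level_alt entries
instance (entries : List (List (String × String))) (out : List (String × List (List (String × String)))) : Decidable (Spec_group_by_level entries out) := by unfold Spec_group_by_level; infer_instance

-- ===== CLAIM (what is proved, stated in full; the proofs are below) =====
def Claim_equal_group_by_level : Prop := ∀ (entries : List (List (String × String))), Dom_group_by_level entries → Spec_group_by_level entries (group_by_level entries)

-- ===== LEMMAS AND PROOFS =====

def pvLvl (e : List (String × String)) : String := (PySem.Dict.ofList e).getD "level" ""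
def pvPairs (entries : List (List (String × String))) : List (String × List (String × String)) :=
  (entries.filter (fun e => pvLvl e != "")).map
    (fun e => (pvLvl e, clean_alt (PySem.Dict.ofList e)))


theorem pv_insertBy_all_lt {α κ : Type} [LinearOrder κ] (K : α → κ) (x : α) (l : List α)
    (h : ∀ z ∈ l, K x < K z) :
    PySem.List.insertBy (fun a b => decide (K a < K b)) x l = x :: l := by
  cases l with
  | nil => rfl
  | cons y ys => simp [PySem.List.insertBy, h y (by simp)]

theorem pv_filter_insertBy {α κ : Type} [LinearOrder κ] (K : α → κ) (p : α → Bool) (x : α)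
    (l : List α) (h : l.Pairwise (fun a b => K a ≤ K b)) :
    (PySem.List.insertBy (fun a b => decide (K a < K b)) x l).filter p
      = if p x then PySem.List.insertBy (fun a b => decide (K a < K b)) x (l.filter p)
        else l.filter p := by
  induction l with
  | nil =>
    cases hpx : p x <;> simp [PySem.List.insertBy, List.filter, hpx]
  | cons y ys ih =>
    rw [List.pairwise_cons] at h
    by_cases hlt : K x < K y
    · rw [show PySem.List.insertBy (fun a b => decide (K a < K b)) x (y :: ys) = x :: y :: ys by
        simp [PySem.List.insertBy, hlt]]
      cases hpx : p x
      · simp [List.filter, hpx]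
      · rw [pv_insertBy_all_lt K x ((y :: ys).filter p) ?_]
        · simp [List.filter, hpx]
        · intro z hz
          rcases List.mem_filter.mp hz with ⟨hz, _⟩
          rcases List.mem_cons.mp hz with rfl | hz
          · exact hlt
          · exact lt_of_lt_of_le hlt (h.1 z hz)
    · rw [show PySem.List.insertBy (fun a b => decide (K a < K b)) x (y :: ys)
          = y :: PySem.List.insertBy (fun a b => decide (K a < K b)) x ys by
        simp [PySem.List.insertBy, hlt]]
      cases hpy : p y
      · simpa [List.filter, hpy] using ih h.2
      · rw [show ((y :: ys).filter p) = y :: ys.filter p by simp [List.filter, hpy]]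
        rw [show PySem.List.insertBy (fun a b => decide (K a < K b)) x (y :: ys.filter p)
            = y :: PySem.List.insertBy (fun a b => decide (K a < K b)) x (ys.filter p) by
          simp [PySem.List.insertBy, hlt]]
        cases hpx : p x
        · simp only [List.filter, hpy, hpx, ih h.2]
          simp
        · simp only [List.filter, hpy, hpx, ih h.2, if_true]

theorem pv_sorted_concat {α κ : Type} [LinearOrder κ] (K : α → κ) (l : List α) (x : α) :
    PySem.List.sorted (l ++ [x]) K false
      = PySem.List.insertBy (fun a b => decide (K a < K b)) x (PySem.List.sorted l K false) := by
  rw [PySem.List.sorted_eq_foldl_insertBy, PySem.List.sorted_eq_foldl_insertBy,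
    List.foldl_append]
  rfl

theorem pv_filter_sorted {α κ : Type} [LinearOrder κ] (K : α → κ) (p : α → Bool) (l : List α) :
    (PySem.List.sorted l K false).filter p = PySem.List.sorted (l.filter p) K false := by
  induction l using List.reverseRecOn with
  | nil => rfl
  | append_singleton l x ih =>
    rw [pv_sorted_concat, pv_filter_insertBy K p x _ (PySem.List.sorted_pairwise l K),
      List.filter_append]
    cases hpx : p x <;> simp [hpx, ih, pv_sorted_concat]

theorem pv_map_insertBy {α β κ : Type} [LinearOrder κ] (K : β → κ) (f : α → β) (x : α)
    (l : List α) :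
    (PySem.List.insertBy (fun a b => decide (K (f a) < K (f b))) x l).map f
      = PySem.List.insertBy (fun a b => decide (K a < K b)) (f x) (l.map f) := by
  induction l with
  | nil => rfl
  | cons y ys ih =>
    by_cases hlt : K (f x) < K (f y) <;> simp [PySem.List.insertBy, hlt, ih]

theorem pv_sorted_map {α β κ : Type} [LinearOrder κ] (K : β → κ) (f : α → β) (l : List α) :
    PySem.List.sorted (l.map f) K false
      = (PySem.List.sorted l (fun a => K (f a)) false).map f := by
  induction l using List.reverseRecOn with
  | nil => rfl
  | append_singleton l x ih =>
    rw [List.map_append, List.map_singleton, pv_sorted_concat, pv_sorted_concat, ih,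
      pv_map_insertBy]

theorem pv_sorted_db {α : Type} (l : List α) (K : α → List Char) (rev : Bool) :
    PySem.List.sorted l K rev
      = @PySem.List.sorted α (List Char)
          (@Preorder.toLT (List Char)
            (@PartialOrder.toPreorder (List Char)
              (@SemilatticeInf.toPartialOrder (List Char)
                (@Lattice.toSemilatticeInf (List Char)
                  (@DistribLattice.toLattice (List Char)
                    (@instDistribLatticeOfLinearOrder (List Char) List.instLinearOrder))))))
          (@LinearOrder.toDecidableLT (List Char) List.instLinearOrder) l K rev := by
  have h : (fun (a b : List Char) => a.decidableLT b)
      = (@LinearOrder.toDecidableLT (List Char) List.instLinearOrder) := by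
    funext a b; exact Subsingleton.elim _ _
  rw [show PySem.List.sorted l K rev
    = @PySem.List.sorted α (List Char) List.instLT (fun a b => a.decidableLT b) l K rev from rfl, h]

theorem pv_set_update_of_mem {α : Type} [BEq α] [LawfulBEq α] (xs : List α) (s : PySem.Set α)
    (h : ∀ x ∈ xs, x ∈ s) : PySem.Set.update s xs = s := by
  induction xs generalizing s with
  | nil => rfl
  | cons x xs ih =>
    rw [show PySem.Set.update s (x :: xs) = PySem.Set.update (PySem.Set.add s x) xs from rfl]
    rw [show PySem.Set.add s x = s by
      have hx : x ∈ s := h x (by simp)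
      simp [PySem.Set.add, PySem.Set.contains, hx]]
    exact ih s (fun y hy => h y (by simp [hy]))

theorem pv_clean_eq (d : PySem.Dict String String) (h : d.keys.Nodup) :
    (clean_entry d).items = clean_alt d := by
  unfold clean_entry clean_alt
  simp only
  set front := ORDERED_KEYS.filter (fun k => d.contains k) with hfront
  have hc : ORDERED_KEYS.foldl
      (fun c k => if d.contains k then c.insert k (d.getD k "") else c) PySem.Dict.empty
      = front.foldl (fun c k => c.insert k (d.getD k "")) PySem.Dict.empty := by
    rw [PySem.List.foldl_if_eq_foldl_filter]
  have hfrontnd : front.Nodup := List.Nodup.filter _ (by decide)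
  have hcitems : (front.foldl (fun c k => c.insert k (d.getD k "")) PySem.Dict.empty).items
      = front.map (fun a => (a, d.getD a "")) := by
    have := PySem.Dict.items_foldl_insert_fresh front (fun a => a) (fun a => d.getD a "")
      PySem.Dict.empty (fun a _ => PySem.Dict.contains_empty a) (by simpa using hfrontnd)
    simpa using this
  have hckeys : (front.foldl (fun c k => c.insert k (d.getD k "")) PySem.Dict.empty).keys
      = front := by
    simp [PySem.Dict.keys, hcitems, Function.comp_def]
  rw [hc]
  -- the extra-key filters agree on d.keys
  have hfilter : d.keys.filter
      (fun k => !((front.foldl (fun c k => c.insert k (d.getD k "")) PySem.Dict.empty).contains k)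
        && !(PySem.Str.startswith k "_"))
      = d.keys.filter (fun k => !(ORDERED_KEYS.contains k) && !(PySem.Str.startswith k "_")) := by
    apply List.filter_congr
    intro k hk
    have hdk : d.contains k = true := (PySem.Dict.contains_iff_mem_keys d k).mpr hk
    have : (front.foldl (fun c k => c.insert k (d.getD k "")) PySem.Dict.empty).contains k
        = ORDERED_KEYS.contains k := by
      rw [PySem.Dict.contains_eq_decide_mem_keys, hckeys, hfront]
      by_cases hmem : k ∈ ORDERED_KEYS
      · simp [List.mem_filter, hmem, hdk]
      · simp [List.mem_filter, hmem]
    rw [this]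
  rw [hfilter]
  set extras := PySem.List.sorted
    (d.keys.filter (fun k => !(ORDERED_KEYS.contains k) && !(PySem.Str.startswith k "_")))
    (fun k => k.toList) false with hextras
  have hexnd : extras.Nodup :=
    ((PySem.List.sorted_perm _ _ _).nodup_iff).mpr (List.Nodup.filter _ h)
  have hfresh : ∀ a ∈ extras,
      (front.foldl (fun c k => c.insert k (d.getD k "")) PySem.Dict.empty).contains a = false := by
    intro a ha
    have ha' := (PySem.List.mem_sorted _ _ _ a).mp ha
    have := (List.mem_filter.mp ha').2
    rw [PySem.Dict.contains_eq_decide_mem_keys, hckeys, hfront]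
    simp only [Bool.and_eq_true, Bool.not_eq_true'] at this
    have hno : a ∉ ORDERED_KEYS := by simpa using this.1
    simp [List.mem_filter, hno]
  rw [PySem.Dict.items_foldl_insert_fresh extras (fun a => a) (fun a => d.getD a "") _
    hfresh (by simpa using hexnd), hcitems, ← List.map_append]

theorem pv_A_eq (entries : List (List (String × String))) :
    group_by_level entries
      = (PySem.Set.ofList ((pvPairs entries).map Prod.fst)).map
          (fun k => (k, PySem.List.sorted
            (((pvPairs entries).filter (fun q => q.1 == k)).map Prod.snd) pvWordKey false)) := by
  unfold group_by_level
  simp only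
  have hbody : ∀ (acc : PySem.Dict String (List (List (String × String)))),
      ∀ e ∈ entries,
      (fun g e =>
        let d := PySem.Dict.ofList e
        match d.get? "level" with
        | none => g
        | some level =>
          if level = "" then g
          else g.modify level [] (fun xs => xs ++ [(clean_entry d).items])) acc e
      = (fun g e => if (pvLvl e != "") = true
          then g.modify (pvLvl e) [] (fun xs => xs ++ [clean_alt (PySem.Dict.ofList e)])
          else g) acc e := by
    intro g e _
    cases hget : (PySem.Dict.ofList e).get? "level" with
    | none =>
      have hl : pvLvl e = "" := by simp [pvLvl, PySem.Dict.getD_eq_get?_getD, hget]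
      simp only [hget, hl]
      simp
    | some lv =>
      have hl : pvLvl e = lv := by simp [pvLvl, PySem.Dict.getD_eq_get?_getD, hget]
      by_cases hlv : lv = ""
      · simp only [hget, hl, hlv]
        simp
      · simp only [hget, hl]
        rw [pv_clean_eq _ (PySem.Dict.nodup_keys_ofList e)]
        simp [hlv]
  rw [PySem.List.foldl_congr_mem entries _ _ PySem.Dict.empty hbody]
  rw [PySem.List.foldl_if_eq_foldl_filter (fun e => pvLvl e != "")
    (fun (g : PySem.Dict String (List (List (String × String)))) e =>
      g.modify (pvLvl e) [] (fun xs => xs ++ [clean_alt (PySem.Dict.ofList e)]))]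
  rw [show (List.foldl (fun (g : PySem.Dict String (List (List (String × String)))) e =>
      g.modify (pvLvl e) [] (fun xs => xs ++ [clean_alt (PySem.Dict.ofList e)])) PySem.Dict.empty
      (entries.filter (fun e => pvLvl e != "")))
    = List.foldl (fun (g : PySem.Dict String (List (List (String × String)))) p =>
        g.modify p.1 [] (fun xs => xs ++ [p.2])) PySem.Dict.empty (pvPairs entries) by
    rw [pvPairs, List.foldl_map]]
  have hnd : (List.foldl (fun (g : PySem.Dict String (List (List (String × String)))) p =>
      g.modify p.1 [] (fun xs => xs ++ [p.2])) PySem.Dict.empty (pvPairs entries)).keys.Nodup := by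
    apply PySem.Dict.nodup_keys_foldl_modify_key (pvPairs entries) Prod.fst []
      (fun d p => fun xs => xs ++ [p.2])
    simp [PySem.Dict.keys_empty]
  have hkeys : (List.foldl (fun (g : PySem.Dict String (List (List (String × String)))) p =>
      g.modify p.1 [] (fun xs => xs ++ [p.2])) PySem.Dict.empty (pvPairs entries)).keys
      = PySem.Set.ofList ((pvPairs entries).map Prod.fst) := by
    rw [PySem.Dict.keys_foldl_modify_key (pvPairs entries) Prod.fst []
      (fun d p => fun xs => xs ++ [p.2])]
    rw [PySem.Set.ofList_eq_foldl, PySem.Dict.keys_empty]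
    rfl
  rw [PySem.Dict.items_eq_map_keys _ hnd [], hkeys, List.map_map]
  apply List.map_congr_left
  intro k hk
  simp only [Function.comp_apply]
  congr 1
  rw [PySem.Dict.getD_foldl_modify_append]
  simp [PySem.Dict.getD_empty]

theorem pv_B_eq (entries : List (List (String × String))) :
    group_by_level_alt entries
      = (PySem.Set.ofList ((pvPairs entries).map Prod.fst)).map
          (fun k => (k, ((PySem.List.sorted (pvPairs entries) (fun p => pvWordKey p.2) false).filter
            (fun q => q.1 == k)).map Prod.snd)) := by
  unfold group_by_level_alt
  simp only
  have hbody : ∀ (acc : List String × List (String × List (String × String))),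
      ∀ e ∈ entries,
      (fun s e =>
        let d := PySem.Dict.ofList e
        let level := d.getD "level" ""
        if level = "" then s
        else (PySem.Set.add s.1 level, s.2 ++ [(level, clean_alt d)])) acc e
      = (fun s e =>
          (if (pvLvl e != "") = true then PySem.Set.add s.1 (pvLvl e) else s.1,
           if (pvLvl e != "") = true then s.2 ++ [(pvLvl e, clean_alt (PySem.Dict.ofList e))]
           else s.2)) acc e := by
    intro s e _
    by_cases hlv : pvLvl e = "" <;> simp only [pvLvl] at hlv <;> simp [pvLvl, hlv]
  rw [PySem.List.foldl_congr_mem entries _ _ ([], []) hbody]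
  rw [PySem.List.foldl_prod_mk
    (f := fun o e => if (pvLvl e != "") = true then PySem.Set.add o (pvLvl e) else o)
    (g := fun fl e => if (pvLvl e != "") = true
      then fl ++ [(pvLvl e, clean_alt (PySem.Dict.ofList e))] else fl)]
  have horder : List.foldl (fun o e => if (pvLvl e != "") = true then PySem.Set.add o (pvLvl e) else o)
      [] entries = PySem.Set.ofList ((pvPairs entries).map Prod.fst) := by
    rw [PySem.List.foldl_if_eq_foldl_filter (fun e => pvLvl e != "")
      (fun o e => PySem.Set.add o (pvLvl e))]
    rw [PySem.Set.ofList_eq_foldl, pvPairs, List.map_map, List.foldl_map]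
    rfl
  have hflat : List.foldl (fun fl e => if (pvLvl e != "") = true
      then fl ++ [(pvLvl e, clean_alt (PySem.Dict.ofList e))] else fl) [] entries
      = pvPairs entries := by
    rw [PySem.List.foldl_if_eq_foldl_filter (fun e => pvLvl e != "")
      (fun fl e => fl ++ [(pvLvl e, clean_alt (PySem.Dict.ofList e))])]
    rw [PySem.List.foldl_append_singleton_eq_map
      (fun e => (pvLvl e, clean_alt (PySem.Dict.ofList e)))]
    simp [pvPairs]
  simp only [horder, hflat]
  set ord := PySem.Set.ofList ((pvPairs entries).map Prod.fst) with hord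
  set SF := PySem.List.sorted (pvPairs entries) (fun p => pvWordKey p.2) false with hSF
  have hordnd : ord.Nodup := PySem.Set.nodup_ofList _
  have hseed := PySem.Dict.items_foldl_insert_fresh ord (fun a => a)
    (fun _ => ([] : List (List (String × String)))) PySem.Dict.empty
    (fun a _ => PySem.Dict.contains_empty a) (by simpa using hordnd)
  have hseedkeys : (List.foldl (fun g lvl => g.insert lvl ([] : List (List (String × String))))
      PySem.Dict.empty ord).keys = ord := by
    simp [PySem.Dict.keys, hseed, Function.comp_def,
      show PySem.Dict.empty.items = ([] : List (String × List (List (String × String)))) from rfl]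
  have hseednd : (List.foldl (fun g lvl => g.insert lvl ([] : List (List (String × String))))
      PySem.Dict.empty ord).keys.Nodup := by rw [hseedkeys]; exact hordnd
  have hmem : ∀ x ∈ SF.map Prod.fst, x ∈ ord := by
    intro x hx
    rcases List.mem_map.mp hx with ⟨q, hq, rfl⟩
    have hq' : q ∈ pvPairs entries := (PySem.List.mem_sorted _ _ _ q).mp hq
    exact (PySem.Set.mem_ofList _ _).mpr (List.mem_map_of_mem hq')
  have hkeys : (List.foldl (fun g p => g.modify p.1 [] (fun xs => xs ++ [p.2]))
      (List.foldl (fun g lvl => g.insert lvl ([] : List (List (String × String))))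
        PySem.Dict.empty ord) SF).keys = ord := by
    rw [PySem.Dict.keys_foldl_modify_key SF Prod.fst [] (fun d p => fun xs => xs ++ [p.2]),
      hseedkeys]
    exact pv_set_update_of_mem _ _ hmem
  have hnd : (List.foldl (fun g p => g.modify p.1 [] (fun xs => xs ++ [p.2]))
      (List.foldl (fun g lvl => g.insert lvl ([] : List (List (String × String))))
        PySem.Dict.empty ord) SF).keys.Nodup := by
    exact PySem.Dict.nodup_keys_foldl_modify_key SF Prod.fst [] (fun d p => fun xs => xs ++ [p.2])
      _ hseednd
  rw [PySem.Dict.items_eq_map_keys _ hnd [], hkeys]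
  apply List.map_congr_left
  intro k hk
  congr 1
  rw [PySem.Dict.getD_foldl_modify_append]
  have hk0 : (List.foldl (fun g lvl => g.insert lvl ([] : List (List (String × String))))
      PySem.Dict.empty ord).getD k [] = [] := by
    apply PySem.Dict.getD_of_mem_items _ _ hseednd
    rw [hseed, show PySem.Dict.empty.items
      = ([] : List (String × List (List (String × String)))) from rfl, List.nil_append]
    exact List.mem_map_of_mem (f := fun a => (a, ([] : List (List (String × String))))) hk
  rw [hk0]
  simp

-- ===== VERDICT (by name: the statement is the Claim_ definition above) =====
theorem group_by_level_spec : Claim_equal_group_by_level := by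
  intro entries _
  unfold Spec_group_by_level
  rw [pv_A_eq, pv_B_eq]
  refine List.map_congr_left (fun k _ => ?_)
  congr 1
  rw [pv_sorted_db, pv_sorted_db, pv_filter_sorted, pv_sorted_map]
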